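-- pv_equiv track=rewrite | github.com/CryAndRRich/hustack | leetcode/dp/2189_Number_of_Ways_to_Build_House_of_Cards/codes/dp.py | houseOfCards
-- ===== SOURCE A (Python) =====
-- from functools import lru_cache
--
-- def houseOfCards(n: int) -> int:
--     maxK = (n + 1) // 3
--
--     @lru_cache(None)
--     def dp(rem: int, cap: int) -> int:
--         if rem == 0:
--             return 1
--         if cap <= 0:
--             return 0
--         limit = min(cap, (rem + 1) // 3)
--         if limit == 0:
--             return 0
--         ans = 0
--         for k in range(1, limit + 1):
--             ans += dp(rem - (3 * k - 1), k - 1)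
--         return ans
--
--     return dp(n, maxK)
-- ===== SOURCE B (Python) =====
-- def houseOfCards(n: int) -> int:
--     # Bottom-up include/exclude subset-sum count over the distinct card costs of the form 3k-1
--     if n < 0:
--         return 0
--     dp = [1] + [0] * n
--     v = 2
--     while v <= n:
--         dp = [dp[s] + (dp[s - v] if s >= v else 0) for s in range(n + 1)]
--         v += 3
--     return dp[n]
-- ===== Notes on version B (the rewrite author's own statement) =====
-- stated objective: faster
-- what changed: Replaces A's memoized top-down recursion that branches on the largest card-count used (a loop of recursive calls per state) by a bottom-up subset-sum counting DP over the distinct card costs of the form 3k-1, one include/exclude array pass per cost.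
import Mathlib
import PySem

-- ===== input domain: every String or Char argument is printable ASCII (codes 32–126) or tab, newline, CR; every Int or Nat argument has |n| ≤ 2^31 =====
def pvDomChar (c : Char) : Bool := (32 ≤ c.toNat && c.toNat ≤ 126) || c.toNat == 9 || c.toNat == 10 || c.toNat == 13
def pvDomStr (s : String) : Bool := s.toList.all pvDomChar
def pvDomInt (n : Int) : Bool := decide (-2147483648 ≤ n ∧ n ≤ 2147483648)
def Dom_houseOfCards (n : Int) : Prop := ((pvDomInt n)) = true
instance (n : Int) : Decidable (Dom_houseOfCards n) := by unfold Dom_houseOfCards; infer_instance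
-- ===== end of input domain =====

-- B replaces A's memoized "choose the largest card-count" recursion by a bottom-up
-- include/exclude subset-sum counting DP over the distinct card costs of the form 3k-1 (objective: faster).

-- ===== PORT A =====
-- dp(rem, cap) of A (the lru_cache memoisation does not change the value; ported as plain recursion)
def dpA (rem cap : Int) : Int :=
  if rem = 0 then 1
  else if cap ≤ 0 then 0
  else
    let limit := min cap (PySem.Int.floordiv (rem + 1) 3)
    if limit = 0 then 0
    else
      (PySem.List.pyRange 1 (limit + 1) 1).attach.foldl
        (fun ans k => ans + dpA (rem - (3 * k.1 - 1)) (k.1 - 1)) 0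
termination_by cap.toNat
decreasing_by
  have hk := (PySem.List.mem_pyRange_one.mp k.2)
  simp only [] at hk
  omega

def houseOfCards (n : Int) : Int :=
  dpA n (PySem.Int.floordiv (n + 1) 3)

-- ===== PORT B =====
-- dp[s]; every index B reads is in range 0..n, where pyGet? = some value and .getD is exact
def bGet (dp : List Int) (s : Int) : Int := (PySem.List.pyGet? dp s).getD 0

-- one round of the comprehension over s in range(n+1): dp[s] + (dp[s-v] if s >= v else 0)
def bStep (n v : Int) (dp : List Int) : List Int :=
  (PySem.List.pyRange 0 (n + 1) 1).map
    (fun s => bGet dp s + (if s ≥ v then bGet dp (s - v) else 0))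

-- the while loop over successive costs v while v ≤ n
def bLoop (n v : Int) (dp : List Int) : List Int :=
  if v ≤ n then bLoop n (v + 3) (bStep n v dp) else dp
termination_by (n + 1 - v).toNat

def houseOfCards_alt (n : Int) : Int :=
  if n < 0 then 0
  else bGet (bLoop n 2 (1 :: List.replicate n.toNat 0)) n

-- ===== PRECONDITION & SPEC =====
def Spec_houseOfCards (n : Int) (out : Int) : Prop := out = houseOfCards_alt n
instance (n : Int) (out : Int) : Decidable (Spec_houseOfCards n out) := by unfold Spec_houseOfCards; infer_instance

-- ===== CLAIM (what is proved, stated in full; the proofs are below) =====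
def Claim_equal_houseOfCards : Prop := ∀ (n : Int), Dom_houseOfCards n → Spec_houseOfCards n (houseOfCards n)

-- ===== LEMMAS AND PROOFS =====

-- Reference count: g rem m = number of subsets of {3k-1 : 1 ≤ k ≤ m} summing to rem.
def g (rem : Int) : Nat → Int
  | 0 => if rem = 0 then 1 else 0
  | m + 1 => g rem m + g (rem - (3 * ((m : Int) + 1) - 1)) m

lemma g_neg {rem : Int} (h : rem < 0) : ∀ m, g rem m = 0 := by
  intro m
  induction m generalizing rem h with
  | zero => simp [g]; omega
  | succ m ih => simp [g, ih h, ih (by omega : rem - (3 * ((m : Int) + 1) - 1) < 0)]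

-- partial sum of A's inner loop
def S (rem l : Int) : Int :=
  (PySem.List.pyRange 1 (l + 1) 1).foldl
    (fun ans k => ans + dpA (rem - (3 * k - 1)) (k - 1)) 0

lemma S_nonpos {rem l : Int} (h : l ≤ 0) : S rem l = 0 := by
  unfold S
  rw [PySem.List.pyRange_one_eq_nil (by omega)]
  rfl

lemma S_succ {rem l : Int} (h : 1 ≤ l) :
    S rem l = S rem (l - 1) + dpA (rem - (3 * l - 1)) (l - 1) := by
  unfold S
  have : l + 1 = (l - 1 + 1) + 1 := by ring
  rw [this, PySem.List.pyRange_one_succ_right (by omega), List.foldl_append]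
  simp

lemma dpA_unfold {rem cap : Int} (hrem : rem ≠ 0) (hcap : 0 < cap) :
    dpA rem cap = S rem (min cap (PySem.Int.floordiv (rem + 1) 3)) := by
  rw [dpA]
  rw [if_neg hrem, if_neg (by omega)]
  dsimp only
  split
  · rename_i h; rw [h, S_nonpos le_rfl]
  · unfold S
    conv_rhs => rw [← List.attach_map_subtype_val
      (PySem.List.pyRange 1 (min cap (PySem.Int.floordiv (rem + 1) 3) + 1) 1), List.foldl_map]

lemma dpA_neg {rem cap : Int} (h : rem < 0) : dpA rem cap = 0 := by
  by_cases hcap : cap ≤ 0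
  · rw [dpA, if_neg (by omega), if_pos hcap]
  · rw [dpA_unfold (by omega) (by omega)]
    have h3 : PySem.Int.floordiv (rem + 1) 3 ≤ 0 := by
      have := PySem.Int.floordiv_mul_add_mod (rem + 1) 3
      have := PySem.Int.mod_nonneg (rem + 1) (b := 3) (by omega)
      omega
    exact S_nonpos (by omega)

lemma dpA_zero (cap : Int) : dpA 0 cap = 1 := by rw [dpA]; simp

-- A's dp satisfies the include/exclude knapsack recurrence
lemma dpA_recur {rem cap : Int} (hcap : 1 ≤ cap) :
    dpA rem cap = dpA rem (cap - 1) + dpA (rem - (3 * cap - 1)) (cap - 1) := by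
  by_cases hrem : rem = 0
  · subst hrem
    rw [dpA_zero, dpA_zero, dpA_neg (by omega)]
    ring
  · set L := PySem.Int.floordiv (rem + 1) 3 with hL
    have hbr : 3 * L ≤ rem + 1 ∧ rem + 1 < 3 * L + 3 := by
      have h1 := PySem.Int.floordiv_mul_add_mod (rem + 1) 3
      have h2 := PySem.Int.mod_nonneg (rem + 1) (b := 3) (by omega)
      have h3 := PySem.Int.mod_lt (rem + 1) (b := 3) (by omega)
      constructor <;> omega
    rw [dpA_unfold hrem (by omega)]
    by_cases hcl : cap ≤ L
    · -- limit = cap; peel the last term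
      rw [min_eq_left hcl, S_succ hcap]
      congr 1
      by_cases h1 : cap - 1 = 0
      · rw [h1, S_nonpos le_rfl, dpA, if_neg hrem, if_pos (by omega)]
      · rw [dpA_unfold hrem (by omega), min_eq_left (by omega)]
    · -- cap > L: the k = cap term is 0 and the limit is L on both sides
      have hmin : min cap L = L := min_eq_right (by omega)
      rw [hmin]
      have hzero : dpA (rem - (3 * cap - 1)) (cap - 1) = 0 :=
        dpA_neg (by omega)
      rw [hzero, add_zero]
      by_cases h1 : cap - 1 = 0
      · rw [h1, S_nonpos (by omega)]
        rw [dpA, if_neg hrem, if_pos (by omega)]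
      · rw [dpA_unfold hrem (by omega), min_eq_right (by omega)]

lemma dpA_eq_g : ∀ (m : Nat) (rem cap : Int), cap.toNat = m → dpA rem cap = g rem m := by
  intro m
  induction m with
  | zero =>
    intro rem cap hc
    have hcap : cap ≤ 0 := by omega
    by_cases hrem : rem = 0
    · subst hrem; rw [dpA]; simp [g]
    · rw [dpA, if_neg hrem, if_pos hcap]; simp [g, hrem]
  | succ m ih =>
    intro rem cap hc
    have hcap : 1 ≤ cap := by omega
    have hm : (cap - 1).toNat = m := by omega
    have hcast : (m : Int) + 1 = cap := by omega
    rw [dpA_recur hcap, g, ih rem (cap - 1) hm, hcast,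
      ih (rem - (3 * cap - 1)) (cap - 1) hm]

-- the list after m rounds of B's loop
def mapG (n : Int) (m : Nat) : List Int :=
  (PySem.List.pyRange 0 (n + 1) 1).map (fun s => g s m)

lemma bGet_mapG {n s : Int} (m : Nat) (h0 : 0 ≤ s) (h1 : s ≤ n) :
    bGet (mapG n m) s = g s m := by
  unfold bGet mapG
  have hcast : (n + 1 : Int) = ((n + 1).toNat : Int) := by omega
  rw [PySem.List.pyGet?_of_nonneg _ h0, hcast,
    PySem.List.getElem?_map_pyRange_zero (fun s => g s m) (n + 1).toNat s.toNat (by omega)]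
  simp [Int.toNat_of_nonneg h0]

lemma bStep_mapG {n : Int} (m : Nat) :
    bStep n (3 * (m : Int) + 2) (mapG n m) = mapG n (m + 1) := by
  unfold bStep
  conv_rhs => unfold mapG
  apply List.map_congr_left
  intro s hs
  have hs' := PySem.List.mem_pyRange_one.mp hs
  rw [bGet_mapG m (by omega) (by omega)]
  show _ = g s m + g (s - (3 * ((m : Int) + 1) - 1)) m
  congr 1
  by_cases hv : s ≥ 3 * (m : Int) + 2
  · rw [if_pos hv, bGet_mapG m (by omega) (by omega)]
    congr 1; ring
  · rw [if_neg hv, g_neg (by omega)]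

lemma mapG_zero {n : Int} (hn : 0 ≤ n) :
    (1 : Int) :: List.replicate n.toNat 0 = mapG n 0 := by
  unfold mapG
  rw [PySem.List.pyRange_one_cons (by omega)]
  simp only [List.map_cons]
  have h1 : g 0 0 = 1 := by simp [g]
  have h2 : (PySem.List.pyRange 1 (n + 1) 1).map (fun s => g s 0) =
      List.replicate n.toNat 0 := by
    rw [List.eq_replicate_iff]
    constructor
    · simp [PySem.List.length_pyRange_one]
    · intro b hb
      obtain ⟨s, hs, rfl⟩ := List.mem_map.mp hb
      have := PySem.List.mem_pyRange_one.mp hs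
      simp [g]; omega
  have h01 : (0 : Int) + 1 = 1 := by norm_num
  rw [h01, h1, h2]

lemma bLoop_mapG {n : Int} (hn : 0 ≤ n) : ∀ (j m : Nat),
    ((PySem.Int.floordiv (n + 1) 3).toNat - m) = j →
    bLoop n (3 * (m : Int) + 2) (mapG n m) =
      mapG n (max m (PySem.Int.floordiv (n + 1) 3).toNat) := by
  have hbr : 3 * PySem.Int.floordiv (n + 1) 3 ≤ n + 1 ∧
      n + 1 < 3 * PySem.Int.floordiv (n + 1) 3 + 3 := by
    have h1 := PySem.Int.floordiv_mul_add_mod (n + 1) 3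
    have h2 := PySem.Int.mod_nonneg (n + 1) (b := 3) (by omega)
    have h3 := PySem.Int.mod_lt (n + 1) (b := 3) (by omega)
    constructor <;> omega
  have hK0 : 0 ≤ PySem.Int.floordiv (n + 1) 3 := by omega
  intro j
  induction j with
  | zero =>
    intro m hm
    have hstop : ¬ (3 * (m : Int) + 2 ≤ n) := by omega
    rw [bLoop, if_neg hstop]
    congr 1
    omega
  | succ j ih =>
    intro m hm
    have hgo : 3 * (m : Int) + 2 ≤ n := by omega
    rw [bLoop, if_pos hgo, bStep_mapG m]
    have : (3 * (m : Int) + 2 + 3) = 3 * ((m : Nat) + 1 : Nat) + 2 := by push_cast; ring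
    rw [this, ih (m + 1) (by omega)]
    congr 1
    omega

-- ===== VERDICT (by name: the statement is the Claim_ definition above) =====
theorem houseOfCards_spec : Claim_equal_houseOfCards := by
  intro n _
  unfold Spec_houseOfCards houseOfCards houseOfCards_alt
  rw [dpA_eq_g (PySem.Int.floordiv (n + 1) 3).toNat n _ rfl]
  by_cases hn : n < 0
  · rw [if_pos hn]
    have : (PySem.Int.floordiv (n + 1) 3).toNat = 0 := by
      have h1 := PySem.Int.floordiv_mul_add_mod (n + 1) 3
      have h2 := PySem.Int.mod_nonneg (n + 1) (b := 3) (by omega)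
      have h3 := PySem.Int.mod_lt (n + 1) (b := 3) (by omega)
      omega
    rw [this]
    simp [g]; omega
  · rw [if_neg hn]
    have hn : 0 ≤ n := by omega
    have h2 : (2 : Int) = 3 * ((0 : Nat) : Int) + 2 := by norm_num
    rw [mapG_zero hn, h2, bLoop_mapG hn _ 0 rfl]
    rw [bGet_mapG _ hn le_rfl, Nat.max_eq_right (Nat.zero_le _)]
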